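-- pv_equiv track=rewrite | github.com/shwetakumari14/Practice-Problems | Pythons Solutions/Maximum height of staircase.py | maxHeighrOfStairCase
-- ===== SOURCE A (Python) =====
-- def maxHeighrOfStairCase(A):
--     low, high, ans = 1, 1000000000, 0
--
--     while low <= high:
--         mid = low + (high-low)//2
--         val = mid * (mid+1)//2
--         if val == A:
--             return mid
--         if val < A:
--             ans = max(ans, mid)
--             low = mid + 1
--         else:
--             high = mid - 1
--
--     return ans
-- ===== SOURCE B (Python) =====
-- def maxHeighrOfStairCase(A):
--     count, total = 0, 0
--     while total + count + 1 <= A: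
--         count += 1
--         total += count
--     return count
-- ===== Notes on version B (the rewrite author's own statement) =====
-- stated objective: simpler
-- what changed: Replaces the binary search over [1,10^9] with a direct greedy loop that accumulates rows incrementally (total += next step) until the next row no longer fits.
import Mathlib
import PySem

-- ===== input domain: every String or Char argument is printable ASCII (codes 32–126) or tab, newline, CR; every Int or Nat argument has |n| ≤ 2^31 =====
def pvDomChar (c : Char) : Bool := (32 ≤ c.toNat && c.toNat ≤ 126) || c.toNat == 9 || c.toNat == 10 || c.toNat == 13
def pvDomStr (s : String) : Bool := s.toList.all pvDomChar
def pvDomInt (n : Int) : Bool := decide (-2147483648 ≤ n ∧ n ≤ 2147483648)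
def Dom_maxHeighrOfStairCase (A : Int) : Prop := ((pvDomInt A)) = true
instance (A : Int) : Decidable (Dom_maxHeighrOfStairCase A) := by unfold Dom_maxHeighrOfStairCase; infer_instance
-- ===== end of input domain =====

-- B replaces A's binary search on [1,10^9] with a direct greedy accumulation of successive rows (simpler; not claimed faster).

-- ===== PORT A =====
-- helper: k*(k+1)//2, the value A computes inline for each midpoint
def tri (m : Int) : Int := PySem.Int.floordiv (m * (m + 1)) 2

-- helper: A's midpoint low + (high-low)//2
def midOf (low high : Int) : Int := low + PySem.Int.floordiv (high - low) 2

lemma midOf_bounds {low high : Int} (h : low ≤ high) :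
    low ≤ midOf low high ∧ midOf low high ≤ high := by
  have h2 := PySem.Int.floordiv_two_mid_bounds (lo := 0) (hi := high - low) (by omega)
  rw [zero_add] at h2
  unfold midOf
  omega

def loopA (A low high ans : Int) : Int :=
  if h : low ≤ high then
    if tri (midOf low high) = A then midOf low high
    else if tri (midOf low high) < A then
      loopA A (midOf low high + 1) high (max ans (midOf low high))
    else
      loopA A low (midOf low high - 1) ans
  else ans
termination_by (high + 1 - low).toNat
decreasing_by
  · have := midOf_bounds h; omega
  · have := midOf_bounds h; omega

def maxHeighrOfStairCase (A : Int) : Int := loopA A 1 1000000000 0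

-- ===== PORT B =====
def loopB (A : Int) (count : Nat) (total : Int) : Int :=
  if h : total + count + 1 ≤ A then loopB A (count + 1) (total + count + 1)
  else (count : Int)
termination_by (A - total).toNat
decreasing_by omega

def maxHeighrOfStairCase_alt (A : Int) : Int := loopB A 0 0

-- ===== PRECONDITION & SPEC =====
def Spec_maxHeighrOfStairCase (A : Int) (out : Int) : Prop := out = maxHeighrOfStairCase_alt A
instance (A : Int) (out : Int) : Decidable (Spec_maxHeighrOfStairCase A out) := by unfold Spec_maxHeighrOfStairCase; infer_instance

-- ===== CLAIM (what is proved, stated in full; the proofs are below) =====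
def Claim_equal_maxHeighrOfStairCase : Prop := ∀ (A : Int), Dom_maxHeighrOfStairCase A → Spec_maxHeighrOfStairCase A (maxHeighrOfStairCase A)

-- ===== LEMMAS AND PROOFS =====

lemma two_tri (m : Int) : 2 * tri m = m * (m + 1) := by
  have he : (2 : Int) ∣ m * (m + 1) := (Int.even_mul_succ_self m).two_dvd
  have : tri m = m * (m + 1) / 2 := PySem.Int.floordiv_eq_ediv_of_pos (by norm_num)
  rw [this, Int.mul_ediv_cancel' he]

lemma tri_succ (m : Int) : tri (m + 1) = tri m + (m + 1) := by
  have h1 := two_tri m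
  have h2 := two_tri (m + 1)
  nlinarith

lemma tri_mono {a b : Int} (ha : 0 ≤ a) (hab : a ≤ b) : tri a ≤ tri b := by
  have h1 := two_tri a
  have h2 := two_tri b
  nlinarith [mul_nonneg (sub_nonneg.2 hab) (by linarith : (0:Int) ≤ b + a + 1)]

-- the characterisation both ports satisfy
def GoodRes (A r : Int) : Prop := 0 ≤ r ∧ (r = 0 ∨ tri r ≤ A) ∧ A < tri (r + 1)

lemma tri_zero : tri 0 = 0 := by decide

lemma good_le {A r1 r2 : Int} (h1 : GoodRes A r1) (h2 : GoodRes A r2) : r1 ≤ r2 := by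
  obtain ⟨hr1, hd1, _⟩ := h1
  obtain ⟨hr2, _, hlt2⟩ := h2
  rcases hd1 with h0 | hle
  · omega
  · by_contra hc
    have : tri (r2 + 1) ≤ tri r1 := tri_mono (by omega) (by omega)
    omega

lemma good_unique {A r1 r2 : Int} (h1 : GoodRes A r1) (h2 : GoodRes A r2) : r1 = r2 :=
  le_antisymm (good_le h1 h2) (good_le h2 h1)

lemma loopB_good (A : Int) (count : Nat) (total : Int)
    (ht : total = tri count) (hd : (count : Int) = 0 ∨ tri count ≤ A) :
    GoodRes A (loopB A count total) := by
  fun_induction loopB A count total with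
  | case1 count total h ih =>
    apply ih
    · push_cast
      rw [tri_succ]
      omega
    · right
      push_cast
      rw [tri_succ]
      omega
  | case2 count total h =>
    refine ⟨by positivity, hd, ?_⟩
    rw [tri_succ]
    omega

lemma loopA_good (A low high ans : Int)
    (h1 : 1 ≤ low) (h2 : low ≤ high + 1) (h3 : ans = low - 1)
    (h4 : ans = 0 ∨ tri ans ≤ A) (h5 : A < tri (high + 1)) :
    GoodRes A (loopA A low high ans) := by
  fun_induction loopA A low high ans with
  | case1 low high ans h heq =>
    have hb := midOf_bounds h
    refine ⟨by omega, Or.inr (le_of_eq heq), ?_⟩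
    rw [tri_succ]
    have := tri_mono (a := 0) (b := midOf low high) (by omega) (by omega)
    rw [tri_zero] at this
    omega
  | case2 low high ans h hne hlt ih =>
    apply ih
    · have hb := midOf_bounds h; omega
    · have hb := midOf_bounds h; omega
    · have hb := midOf_bounds h
      rw [max_eq_right (by omega)]
      ring
    · right; rw [max_eq_right (by have hb := midOf_bounds h; omega)]; omega
    · exact h5
  | case3 low high ans h hne hnlt ih =>
    apply ih <;> try assumption
    · have hb := midOf_bounds h; omega
    · rw [sub_add_cancel]; omega
  | case4 low high ans h =>
    have hl : low = high + 1 := by omega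
    refine ⟨by omega, h4, ?_⟩
    rw [h3, sub_add_cancel, hl]
    exact h5

lemma dom_bound {A : Int} (h : Dom_maxHeighrOfStairCase A) : A ≤ 2147483648 := by
  simp only [Dom_maxHeighrOfStairCase, pvDomInt, decide_eq_true_eq] at h
  omega

-- ===== VERDICT (by name: the statement is the Claim_ definition above) =====
theorem maxHeighrOfStairCase_spec : Claim_equal_maxHeighrOfStairCase := by
  intro A hDom
  unfold Spec_maxHeighrOfStairCase maxHeighrOfStairCase maxHeighrOfStairCase_alt
  have hA := dom_bound hDom
  have hbig : A < tri (1000000000 + 1) := by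
    have := two_tri (1000000000 + 1)
    nlinarith
  have hGA : GoodRes A (loopA A 1 1000000000 0) :=
    loopA_good A 1 1000000000 0 (by norm_num) (by norm_num) (by norm_num)
      (Or.inl rfl) hbig
  have hGB : GoodRes A (loopB A 0 0) := by
    apply loopB_good
    · rw [Nat.cast_zero, tri_zero]
    · left; rfl
  exact good_unique hGA hGB
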